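-- pv_equiv track=rewrite | github.com/Kronrod-Extensions-Library/kes | rulelistfile.py | merge_rulelists
-- ===== SOURCE A (Python) =====
-- import itertools
--
-- def merge_rulelists(allrules):
--
--     mergedrules = {}
--
--     key = lambda x: x[0]
--     for g, si in itertools.groupby(sorted(allrules.keys(), key=key), key):
--         pmax = 0
--         rmax = 0
--         rules = []
--
--         for i in si:
--             n, p, r = i
--             pmax = max(pmax, p)
--             rmax = max(rmax, r)
--             rules += allrules[i]
--
--         mergedrules[(g, pmax, rmax)] = sorted(list(set(rules)))
--
--     return mergedrules
-- ===== SOURCE B (Python) =====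
-- def merge_rulelists(allrules):
--     # One hash-grouped pass over the items (no key sort, no groupby), then a
--     # finalisation pass over the groups in ascending group order.
--     acc = {}
--     for (n, p, r), vals in allrules.items():
--         pmax, rmax, rules = acc.get(n, (0, 0, []))
--         acc[n] = (max(pmax, p), max(rmax, r), rules + vals)
--
--     merged = {}
--     for g in sorted(acc):
--         pmax, rmax, rules = acc[g]
--         merged[(g, pmax, rmax)] = sorted(set(rules))
--     return merged
-- ===== Notes on version B (the rewrite author's own statement) =====
-- stated objective: alternative
-- what changed: Replaces sort-all-keys + itertools.groupby consecutive grouping with a single hash-grouped pass over the items that maintains running pmax/rmax and a concatenated rules list per prefix, followed by a finalisation pass over the groups in ascending order; only the (few) distinct group keys are sorted.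
import Mathlib
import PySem

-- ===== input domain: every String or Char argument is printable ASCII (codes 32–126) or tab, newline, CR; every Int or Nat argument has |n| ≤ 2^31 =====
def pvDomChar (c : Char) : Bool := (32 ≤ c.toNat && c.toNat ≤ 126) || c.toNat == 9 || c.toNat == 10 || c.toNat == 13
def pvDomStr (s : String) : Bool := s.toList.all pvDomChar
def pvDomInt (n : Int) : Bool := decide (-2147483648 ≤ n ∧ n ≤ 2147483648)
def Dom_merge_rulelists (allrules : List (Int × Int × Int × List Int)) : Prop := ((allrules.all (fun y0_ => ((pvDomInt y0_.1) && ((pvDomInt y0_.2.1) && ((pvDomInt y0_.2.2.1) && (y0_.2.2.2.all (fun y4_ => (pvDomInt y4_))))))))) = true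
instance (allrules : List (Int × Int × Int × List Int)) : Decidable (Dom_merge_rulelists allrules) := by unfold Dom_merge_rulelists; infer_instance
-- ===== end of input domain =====

-- B replaces sort-all-keys + itertools.groupby grouping with one hash-grouped
-- accumulation pass over the items plus a finalisation pass over the groups in
-- ascending order (objective: alternative grouping strategy).

-- ===== PORT A =====
-- the dict key (n, p, r) of an entry of the association list
def pvKey (e : Int × Int × Int × List Int) : Int × Int × Int := (e.1, e.2.1, e.2.2.1)

-- itertools.groupby(xs, key=lambda x: x[0]): consecutive runs of equal first components
def pvGroupBy : List (Int × Int × Int) → List (Int × List (Int × Int × Int))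
  | [] => []
  | x :: rest =>
      (x.1, x :: rest.takeWhile (fun y => y.1 == x.1)) ::
        pvGroupBy (rest.dropWhile (fun y => y.1 == x.1))
termination_by xs => xs.length
decreasing_by
  simpa using Nat.lt_succ_of_le (List.length_dropWhile_le _ _)

def merge_rulelists (allrules : List (Int × Int × Int × List Int)) : List (Int × Int × Int × List Int) :=
  let d : PySem.Dict (Int × Int × Int) (List Int) :=
    PySem.Dict.mk (allrules.map (fun e => (pvKey e, e.2.2.2)))
  let sortedKeys := PySem.List.sorted d.keys (fun x => x.1) false
  let merged : PySem.Dict (Int × Int × Int) (List Int) :=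
    (pvGroupBy sortedKeys).foldl (fun md gp =>
      -- inner loop 'for i in si' over the group, folding (pmax, rmax, rules);
      -- allrules[i] is d.getD i []: i always comes from d's keys, so no KeyError
      let st := gp.2.foldl
        (fun (s : Int × Int × List Int) i => (max s.1 i.2.1, max s.2.1 i.2.2, s.2.2 ++ d.getD i []))
        (0, 0, [])
      md.insert (gp.1, st.1, st.2.1) (PySem.List.sorted (PySem.Set.ofList st.2.2) (fun x => x) false))
      PySem.Dict.empty
  merged.items.map (fun p => (p.1.1, p.1.2.1, p.1.2.2, p.2))

-- ===== PORT B =====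
def merge_rulelists_alt (allrules : List (Int × Int × Int × List Int)) : List (Int × Int × Int × List Int) :=
  -- accumulation pass: acc[n] = (pmax, rmax, rules) per prefix n (acc.get(n, (0,0,[])))
  let acc : PySem.Dict Int (Int × Int × List Int) :=
    allrules.foldl (fun a e =>
      a.insert e.1 (max (a.getD e.1 (0, 0, [])).1 e.2.1,
                    max (a.getD e.1 (0, 0, [])).2.1 e.2.2.1,
                    (a.getD e.1 (0, 0, [])).2.2 ++ e.2.2.2))
      PySem.Dict.empty
  -- finalisation pass over sorted(acc), emitting the merged dict's items
  -- (acc[g] never raises: g is drawn from acc's keys, so getD's default is never used)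
  (PySem.List.sorted acc.keys (fun x => x) false).map (fun g =>
    (g, (acc.getD g (0, 0, [])).1, (acc.getD g (0, 0, [])).2.1,
     PySem.List.sorted (PySem.Set.ofList (acc.getD g (0, 0, [])).2.2) (fun x => x) false))

-- ===== PRECONDITION & SPEC =====
-- Pre_ excludes association lists with duplicate (n, p, r) keys: such lists do not
-- represent a Python dict (the input type of A), so no claim is made about them.
def Pre_merge_rulelists (allrules : List (Int × Int × Int × List Int)) : Prop :=
  (allrules.map (fun e => (e.1, e.2.1, e.2.2.1))).Nodup
instance (allrules : List (Int × Int × Int × List Int)) : Decidable (Pre_merge_rulelists allrules) := by unfold Pre_merge_rulelists; infer_instance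

def pvWitness_merge_rulelists : (List (Int × Int × Int × List Int)) :=
  [(1, 2, 3, [4, 1, 4]), (1, 0, 5, [2, 4]), (0, 1, 1, [])]

def Spec_merge_rulelists (allrules : List (Int × Int × Int × List Int)) (out : List (Int × Int × Int × List Int)) : Prop := out = merge_rulelists_alt allrules
instance (allrules : List (Int × Int × Int × List Int)) (out : List (Int × Int × Int × List Int)) : Decidable (Spec_merge_rulelists allrules out) := by unfold Spec_merge_rulelists; infer_instance

-- ===== CLAIM (what is proved, stated in full; the proofs are below) =====
def Claim_equal_merge_rulelists : Prop := ∀ (allrules : List (Int × Int × Int × List Int)), Dom_merge_rulelists allrules → Pre_merge_rulelists allrules → Spec_merge_rulelists allrules (merge_rulelists allrules)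

-- ===== LEMMAS AND PROOFS =====

-- canonical value both programs compute, indexed by the sorted distinct prefixes
def pvCanon (allrules : List (Int × Int × Int × List Int)) (g : Int) : Int × Int × Int × List Int :=
  let L := allrules.filter (fun e => e.1 == g)
  (g, L.foldl (fun m e => max m e.2.1) 0, L.foldl (fun m e => max m e.2.2.1) 0,
   PySem.List.sorted (PySem.Set.ofList (L.flatMap (fun e => e.2.2.2))) (fun x => x) false)

def pvGlist (allrules : List (Int × Int × Int × List Int)) : List Int :=
  PySem.List.sorted (PySem.Set.ofList (allrules.map (fun e => e.1))) (fun x => x) false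

-- after dropWhile (== c) on a list sorted by first component, every first component exceeds c
theorem pvDrop_gt (l : List (Int × Int × Int)) (c : Int)
    (hpw : l.Pairwise (fun a b => a.1 ≤ b.1)) (hle : ∀ y ∈ l, c ≤ y.1) :
    ∀ y ∈ l.dropWhile (fun y => y.1 == c), c < y.1 := by
  induction l with
  | nil => simp
  | cons a t ih =>
    by_cases ha : a.1 = c
    · rw [List.dropWhile_cons_of_pos (by simp [ha])]
      exact ih hpw.tail (fun y hy => hle y (List.mem_cons_of_mem a hy))
    · rw [List.dropWhile_cons_of_neg (by simp [ha])]
      intro y hy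
      rcases List.mem_cons.mp hy with rfl | hyt
      · exact lt_of_le_of_ne (hle y (List.mem_cons_self)) (fun hc => ha hc.symm)
      · exact lt_of_lt_of_le
          (lt_of_le_of_ne (hle a List.mem_cons_self) (fun hc => ha hc.symm))
          (List.rel_of_pairwise_cons hpw hyt)

-- on a list sorted by first component, groupby yields strictly increasing labels,
-- covering exactly the occurring first components, and each group is the filter at its label
theorem pvGroupBy_sorted (xs : List (Int × Int × Int))
    (h : xs.Pairwise (fun a b => a.1 ≤ b.1)) :
    ((pvGroupBy xs).map (fun p => p.1)).Pairwise (· < ·)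
    ∧ (∀ a, a ∈ (pvGroupBy xs).map (fun p => p.1) ↔ a ∈ xs.map (fun y => y.1))
    ∧ ∀ p ∈ pvGroupBy xs, p.2 = xs.filter (fun y => y.1 == p.1) := by
  induction xs using pvGroupBy.induct with
  | case1 => simp [pvGroupBy]
  | case2 x rest ih =>
    rw [pvGroupBy]
    have hgrp : ∀ y ∈ rest.takeWhile (fun y => y.1 == x.1), y.1 = x.1 := by
      intro y hy; simpa using List.mem_takeWhile_imp hy
    have hpw' : (rest.dropWhile (fun y => y.1 == x.1)).Pairwise (fun a b => a.1 ≤ b.1) :=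
      h.tail.sublist (List.dropWhile_sublist _)
    have hlt : ∀ y ∈ rest.dropWhile (fun y => y.1 == x.1), x.1 < y.1 :=
      pvDrop_gt _ _ h.tail (fun y hy => List.rel_of_pairwise_cons h hy)
    obtain ⟨ih1, ih2, ih3⟩ := ih hpw'
    have hsplit : rest.takeWhile (fun y => y.1 == x.1) ++ rest.dropWhile (fun y => y.1 == x.1) = rest :=
      List.takeWhile_append_dropWhile
    revert hgrp hlt ih1 ih2 ih3 hsplit
    generalize rest.takeWhile (fun y => y.1 == x.1) = grp
    generalize rest.dropWhile (fun y => y.1 == x.1) = rest'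
    intro hgrp hlt ih1 ih2 ih3 hsplit
    refine ⟨?_, ?_, ?_⟩
    · refine List.Pairwise.cons ?_ ih1
      intro a ha
      rcases List.mem_map.mp ((ih2 a).mp ha) with ⟨y, hy, rfl⟩
      exact hlt y hy
    · intro a
      simp only [List.map_cons, List.mem_cons]
      rw [ih2]
      constructor
      · rintro (rfl | ha)
        · exact Or.inl rfl
        · rcases List.mem_map.mp ha with ⟨y, hy, rfl⟩
          exact Or.inr (List.mem_map.mpr ⟨y, by
            rw [← hsplit]; exact List.mem_append_right _ hy, rfl⟩)
      · rintro (rfl | ha)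
        · exact Or.inl rfl
        · rcases List.mem_map.mp ha with ⟨y, hy, rfl⟩
          rw [← hsplit] at hy
          rcases List.mem_append.mp hy with hyg | hyd
          · exact Or.inl (hgrp y hyg)
          · exact Or.inr (List.mem_map.mpr ⟨y, hyd, rfl⟩)
    · intro p hp
      rcases List.mem_cons.mp hp with rfl | hp'
      · simp only
        rw [List.filter_cons_of_pos (by simp), ← hsplit, List.filter_append]
        rw [List.filter_eq_self.mpr (fun y hy => by simp [hgrp y hy]),
            List.filter_eq_nil_iff.mpr (fun y hy => by simp [(hlt y hy).ne'])]
        simp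
      · rw [ih3 p hp']
        have hgt : x.1 < p.1 := by
          rcases List.mem_map.mp ((ih2 p.1).mp (List.mem_map.mpr ⟨p, hp', rfl⟩)) with ⟨y, hy, he⟩
          rw [← he]; exact hlt y hy
        have hnil : grp.filter (fun y => y.1 == p.1) = [] :=
          List.filter_eq_nil_iff.mpr (fun y hy => by simp [hgrp y hy, hgt.ne])
        rw [List.filter_cons_of_neg (by simp [hgt.ne]), ← hsplit, List.filter_append, hnil,
          List.nil_append]

-- B's accumulation loop, characterised per group label
theorem pvAccB_getD (l : List (Int × Int × Int × List Int))
    (d : PySem.Dict Int (Int × Int × List Int)) (g : Int) :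
    (l.foldl (fun a e =>
      a.insert e.1 (max (a.getD e.1 (0, 0, [])).1 e.2.1,
                    max (a.getD e.1 (0, 0, [])).2.1 e.2.2.1,
                    (a.getD e.1 (0, 0, [])).2.2 ++ e.2.2.2)) d).getD g (0, 0, []) =
    ((l.filter (fun e => e.1 == g)).foldl (fun m e => max m e.2.1) ((d.getD g (0, 0, [])).1),
     (l.filter (fun e => e.1 == g)).foldl (fun m e => max m e.2.2.1) ((d.getD g (0, 0, [])).2.1),
     (d.getD g (0, 0, [])).2.2 ++ (l.filter (fun e => e.1 == g)).flatMap (fun e => e.2.2.2)) := by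
  induction l generalizing d with
  | nil => simp
  | cons e l ih =>
    simp only [List.foldl_cons, List.filter_cons]
    rw [ih]
    by_cases hg : e.1 = g
    · subst hg; simp
    · simp [PySem.Dict.getD_insert, hg, Ne.symm hg]

-- split A's triple inner fold into three independent folds
theorem pvFold3 (d : PySem.Dict (Int × Int × Int) (List Int)) (ks : List (Int × Int × Int))
    (a b : Int) (c : List Int) :
    ks.foldl (fun (s : Int × Int × List Int) i => (max s.1 i.2.1, max s.2.1 i.2.2, s.2.2 ++ d.getD i []))
      (a, b, c)
    = (ks.foldl (fun m i => max m i.2.1) a, ks.foldl (fun m i => max m i.2.2) b,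
       c ++ ks.flatMap (fun i => d.getD i [])) := by
  induction ks generalizing a b c with
  | nil => simp
  | cons k ks ih => simp [ih, List.append_assoc]

theorem pvB_canon (allrules : List (Int × Int × Int × List Int)) :
    merge_rulelists_alt allrules = (pvGlist allrules).map (pvCanon allrules) := by
  simp only [merge_rulelists_alt, pvGlist]
  have hk : (allrules.foldl (fun a e =>
      a.insert e.1 (max (a.getD e.1 (0, 0, [])).1 e.2.1,
                    max (a.getD e.1 (0, 0, [])).2.1 e.2.2.1,
                    (a.getD e.1 (0, 0, [])).2.2 ++ e.2.2.2))
      (PySem.Dict.empty : PySem.Dict Int (Int × Int × List Int))).keys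
      = PySem.Set.ofList (allrules.map (fun e => e.1)) := by
    rw [PySem.Dict.keys_foldl_insert_key]
    simp [PySem.Set.update_nil_left]
  rw [hk]
  refine List.map_congr_left ?_
  intro g hg
  rw [pvAccB_getD]
  simp [pvCanon]

theorem pvA_canon (allrules : List (Int × Int × Int × List Int))
    (hpre : Pre_merge_rulelists allrules) :
    merge_rulelists allrules = (pvGlist allrules).map (pvCanon allrules) := by
  simp only [merge_rulelists]
  set d : PySem.Dict (Int × Int × Int) (List Int) :=
    PySem.Dict.mk (allrules.map (fun e => (pvKey e, e.2.2.2))) with hd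
  have hitems : d.items = allrules.map (fun e => (pvKey e, e.2.2.2)) := rfl
  have hkeys : d.keys = allrules.map pvKey := by
    simp [PySem.Dict.keys, hitems]
  have hnd : d.keys.Nodup := by
    rw [hkeys]; simpa [pvKey] using hpre
  set sk := PySem.List.sorted d.keys (fun x => x.1) false with hsk
  have hpw : sk.Pairwise (fun a b => a.1 ≤ b.1) := PySem.List.sorted_pairwise d.keys _
  have hskperm : sk.Perm d.keys := PySem.List.sorted_perm d.keys _ false
  obtain ⟨g1, g2, g3⟩ := pvGroupBy_sorted sk hpw
  set GB := pvGroupBy sk with hGB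
  have hndg : (GB.map (fun p => p.1)).Nodup := g1.imp ne_of_lt
  -- the merged dict's items: one fresh insert per group
  have hfresh : (GB.foldl (fun md gp =>
      md.insert (gp.1,
        (gp.2.foldl (fun (s : Int × Int × List Int) i => (max s.1 i.2.1, max s.2.1 i.2.2, s.2.2 ++ d.getD i [])) (0, 0, [])).1,
        (gp.2.foldl (fun (s : Int × Int × List Int) i => (max s.1 i.2.1, max s.2.1 i.2.2, s.2.2 ++ d.getD i [])) (0, 0, [])).2.1)
        (PySem.List.sorted (PySem.Set.ofList
          (gp.2.foldl (fun (s : Int × Int × List Int) i => (max s.1 i.2.1, max s.2.1 i.2.2, s.2.2 ++ d.getD i [])) (0, 0, [])).2.2) (fun x => x) false))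
      PySem.Dict.empty).items
      = GB.map (fun gp =>
        ((gp.1,
          (gp.2.foldl (fun (s : Int × Int × List Int) i => (max s.1 i.2.1, max s.2.1 i.2.2, s.2.2 ++ d.getD i [])) (0, 0, [])).1,
          (gp.2.foldl (fun (s : Int × Int × List Int) i => (max s.1 i.2.1, max s.2.1 i.2.2, s.2.2 ++ d.getD i [])) (0, 0, [])).2.1),
         PySem.List.sorted (PySem.Set.ofList
          (gp.2.foldl (fun (s : Int × Int × List Int) i => (max s.1 i.2.1, max s.2.1 i.2.2, s.2.2 ++ d.getD i [])) (0, 0, [])).2.2) (fun x => x) false)) := by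
    rw [PySem.Dict.items_foldl_insert_fresh]
    · rfl
    · intro a _; exact PySem.Dict.contains_empty _
    · apply List.Nodup.of_map (f := fun q : Int × Int × Int => q.1)
      rw [List.map_map]
      exact hndg
  -- the sorted distinct prefixes are exactly the group labels
  have hglist : pvGlist allrules = GB.map (fun p => p.1) := by
    refine PySem.List.sorted_eq_of_perm_of_pairwise_lt _ _ _ ?_ g1
    refine (List.perm_ext_iff_of_nodup hndg (PySem.Set.nodup_ofList _)).mpr ?_
    intro a
    rw [PySem.Set.mem_ofList, g2 a]
    have : (sk.map (fun y => y.1)).Perm (allrules.map (fun e => e.1)) := by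
      have := hskperm.map (fun y : Int × Int × Int => y.1)
      rwa [hkeys, List.map_map] at this
    exact this.mem_iff
  -- each emitted group equals the canonical quadruple at its label
  have hgrpeq : ∀ gp ∈ GB,
      ((gp.1,
        (gp.2.foldl (fun (s : Int × Int × List Int) i => (max s.1 i.2.1, max s.2.1 i.2.2, s.2.2 ++ d.getD i [])) (0, 0, [])).1,
        (gp.2.foldl (fun (s : Int × Int × List Int) i => (max s.1 i.2.1, max s.2.1 i.2.2, s.2.2 ++ d.getD i [])) (0, 0, [])).2.1,
        PySem.List.sorted (PySem.Set.ofList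
          (gp.2.foldl (fun (s : Int × Int × List Int) i => (max s.1 i.2.1, max s.2.1 i.2.2, s.2.2 ++ d.getD i [])) (0, 0, [])).2.2) (fun x => x) false)
        : Int × Int × Int × List Int)
      = pvCanon allrules gp.1 := by
    intro gp hgp
    rw [g3 gp hgp, pvFold3]
    set L := allrules.filter (fun e => e.1 == gp.1) with hL
    have hperm : (sk.filter (fun y => y.1 == gp.1)).Perm (L.map pvKey) := by
      refine (hskperm.filter _).trans ?_
      rw [hkeys, List.filter_map]
      rfl
    have hpm : (sk.filter (fun y => y.1 == gp.1)).foldl (fun m i => max m i.2.1) 0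
        = L.foldl (fun m e => max m e.2.1) 0 := by
      rw [List.Perm.foldl_eq (rcomm := ⟨fun b a1 a2 => by simp [max_comm, max_left_comm]⟩) hperm 0,
          List.foldl_map]
      rfl
    have hrm : (sk.filter (fun y => y.1 == gp.1)).foldl (fun m i => max m i.2.2) 0
        = L.foldl (fun m e => max m e.2.2.1) 0 := by
      rw [List.Perm.foldl_eq (rcomm := ⟨fun b a1 a2 => by simp [max_comm, max_left_comm]⟩) hperm 0,
          List.foldl_map]
      rfl
    have hr2 : (L.map pvKey).flatMap (fun i => d.getD i []) = L.flatMap (fun e => e.2.2.2) := by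
      rw [List.flatMap_map]
      refine List.flatMap_congr ?_
      intro e he
      have hmem : (pvKey e, e.2.2.2) ∈ d.items := by
        rw [hitems]
        exact List.mem_map_of_mem (List.mem_of_mem_filter he)
      exact PySem.Dict.getD_of_mem_items d hmem hnd []
    have hrperm : ((sk.filter (fun y => y.1 == gp.1)).flatMap (fun i => d.getD i [])).Perm
        (L.flatMap (fun e => e.2.2.2)) := by
      rw [← hr2]
      exact List.Perm.flatMap_right _ hperm
    have hsets : PySem.List.sorted (PySem.Set.ofList ((sk.filter (fun y => y.1 == gp.1)).flatMap (fun i => d.getD i []))) (fun x => x) false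
        = PySem.List.sorted (PySem.Set.ofList (L.flatMap (fun e => e.2.2.2))) (fun x => x) false := by
      apply PySem.List.sorted_eq_sorted_of_perm _ _ _ (fun a b h => h)
      refine (List.perm_ext_iff_of_nodup (PySem.Set.nodup_ofList _) (PySem.Set.nodup_ofList _)).mpr ?_
      intro a
      rw [PySem.Set.mem_ofList, PySem.Set.mem_ofList]
      exact hrperm.mem_iff
    simp only [pvCanon, ← hL, List.nil_append]
    rw [hpm, hrm, hsets]
  rw [hfresh, hglist, List.map_map, List.map_map]
  refine List.map_congr_left ?_
  intro gp hgp
  simpa using hgrpeq gp hgp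

-- ===== VERDICT (by name: the statement is the Claim_ definition above) =====
theorem merge_rulelists_spec : Claim_equal_merge_rulelists := by
  intro allrules _ hpre
  unfold Spec_merge_rulelists
  rw [pvA_canon allrules hpre, pvB_canon allrules]
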